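-- pv_equiv track=rewrite | github.com/zehnsechs/egoi-2024-testdata | day1/gardendecorations/submissions/partially_accepted/worstcasequeries.py | solve
-- ===== SOURCE A (Python) =====
-- def solve_cycle_rec(n, cycle, parity):
--     cn = len(cycle)
--     if cn == 1:
--         return []
--     assert cn > 1
--     sched = [
--         [[i] for i in range(n)]
--         for _ in range(3)
--     ]
--     ncycle = []
--     for i in range(cn//2):
--         a = cycle[2*i]
--         b = cycle[2*i+1]
--         ncycle.append(b)
--         if (a > b) ^ parity:
--             a, b = b, a
--         sched[0][b] = [a, b]
--         sched[1][a] = [a, b]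
--         sched[2][b] = [a, b]
--     if cn % 2:
--         ncycle.append(cycle[-1])
--     sched2 = solve_cycle_rec(n, ncycle, parity^1)
--     return sched + sched2
--
-- def solve_cycle(cycle):
--     # cycle[i] should get value from cycle[i+1]
--     n = len(cycle)
--     assert sorted(cycle) == list(range(n))
--     return solve_cycle_rec(n, cycle, 0)
--
-- def solve(perm):
--     n = len(perm)
--     seen = [False] * n
--     total_sched = []
--     inv = [-1] * n
--     for i in range(n):
--         if seen[i]:
--             continue
--         cycle = []
--         at = i
--         while not seen[at]:
--             cycle.append(at)
--             seen[at] = True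
--             at = perm[at]
--         ren = sorted(cycle)
--         for j, k in enumerate(ren):
--             inv[k] = j
--         subsched = solve_cycle([inv[x] for x in cycle])
--         while len(total_sched) < len(subsched):
--             total_sched.append([[i] for i in range(n)])
--         for it, inds in enumerate(subsched):
--             tot_inds = total_sched[it]
--             for j in range(len(inds)):
--                 tot_inds[ren[j]] = [ren[x] for x in inds[j]]
--
--     return total_sched
-- ===== SOURCE B (Python) =====
-- def solve_cycle_iter(n, cycle):
--     # Iterative halving: per level, collect pair overrides in dicts and
--     # materialise the three rows from them; next cycle is the odd-index slice
--     # (plus the carried last element when the length is odd).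
--     total = []
--     parity = 0
--     while len(cycle) > 1:
--         ov0, ov1, ov2 = {}, {}, {}
--         for a, b in zip(cycle[0::2], cycle[1::2]):
--             if (a > b) ^ parity:
--                 a, b = b, a
--             ov0[b] = [a, b]
--             ov1[a] = [a, b]
--             ov2[b] = [a, b]
--         for ov in (ov0, ov1, ov2):
--             total.append([ov.get(i, [i]) for i in range(n)])
--         ncycle = cycle[1::2]
--         if len(cycle) % 2:
--             ncycle.append(cycle[-1])
--         cycle = ncycle
--         parity ^= 1
--     return total
--
-- def solve(perm):
--     n = len(perm)
--     seen = [False] * n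
--     total_sched = []
--     inv = [-1] * n
--     for i in range(n):
--         if seen[i]:
--             continue
--         cycle = []
--         at = i
--         while not seen[at]:
--             cycle.append(at)
--             seen[at] = True
--             at = perm[at]
--         ren = sorted(cycle)
--         for j, k in enumerate(ren):
--             inv[k] = j
--         subsched = solve_cycle_iter(len(cycle), [inv[x] for x in cycle])
--         while len(total_sched) < len(subsched):
--             total_sched.append([[i] for i in range(n)])
--         for it, inds in enumerate(subsched):
--             tot_inds = total_sched[it]
--             for j in range(len(inds)):
--                 tot_inds[ren[j]] = [ren[x] for x in inds[j]]
--
--     return total_sched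
-- ===== Notes on version B (the rewrite author's own statement) =====
-- stated objective: alternative
-- what changed: The linearly-recursive solve_cycle_rec is replaced by an explicit iterative halving loop that collects each level's pair overrides in dicts and materialises the three rows from them via get(), and builds the next cycle as the odd-index slice plus the odd-length carry, instead of recursing with in-place list assignments indexed by range(cn//2).
import Mathlib
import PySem

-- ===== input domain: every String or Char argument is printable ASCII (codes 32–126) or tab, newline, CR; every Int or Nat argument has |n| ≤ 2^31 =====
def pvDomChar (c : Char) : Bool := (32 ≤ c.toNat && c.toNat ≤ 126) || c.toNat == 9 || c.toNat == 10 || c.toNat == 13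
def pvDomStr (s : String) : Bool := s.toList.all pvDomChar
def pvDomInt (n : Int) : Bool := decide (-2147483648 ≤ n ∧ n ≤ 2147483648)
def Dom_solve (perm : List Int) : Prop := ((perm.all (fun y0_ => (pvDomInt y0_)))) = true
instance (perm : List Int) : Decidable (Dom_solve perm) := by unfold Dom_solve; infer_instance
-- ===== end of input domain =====

-- B replaces the linear recursion over halved cycles by an explicit iterative loop that
-- materialises each level's three rows from per-pair override dicts and builds the next
-- cycle by slicing; same results, same cost (objective: alternative).

-- shared index helpers with Python's negative-index wraparound (exact on the admitted
-- inputs, where every index is in range after the wrap)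
def pvGetW {α : Type} (l : List α) (i : Int) (d : α) : α :=
  let j := if i < 0 then i + l.length else i
  if 0 ≤ j then l.getD j.toNat d else d
def pvSetW {α : Type} (l : List α) (i : Int) (v : α) : List α :=
  let j := if i < 0 then i + l.length else i
  if 0 ≤ j then l.set j.toNat v else l
-- plain non-negative indexing for the cycle solvers: their cycles are the rank-renamed
-- values 0..cn-1, so a negative index (which Python would wrap) is unreachable there
def pvSetAt {α : Type} (l : List α) (i : Int) (v : α) : List α :=
  if 0 ≤ i then l.set i.toNat v else l
-- [[i] for i in range(n)]
def pvDefaultRow (n : Nat) : List (List Int) := (List.range n).map (fun (i : Nat) => [(i : Int)])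

-- the cycle-extraction while loop (fuel only bounds the loop; n+1 steps always suffice)
def pvBuildCycle (perm : List Int) : Nat → List Bool → Int → (List Int × List Bool)
  | 0, seen, _ => ([], seen)
  | fuel+1, seen, at_ =>
    if pvGetW seen at_ true then ([], seen)
    else
      let seen' := pvSetW seen at_ true
      let r := pvBuildCycle perm fuel seen' (pvGetW perm at_ 0)
      (at_ :: r.1, r.2)

-- merging one cycle's subschedule into total_sched (incl. the padding while loop)
def pvMergeStep (n : Nat) (ren : List Int) (subsched : List (List (List Int)))
    (total : List (List (List Int))) : List (List (List Int)) :=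
  let total := total ++ List.replicate (subsched.length - total.length) (pvDefaultRow n)
  (PySem.List.enumerate subsched 0).foldl (fun tot p =>
      let row := (PySem.List.enumerate p.2 0).foldl
        (fun row q => pvSetW row (pvGetW ren q.1 0) (q.2.map (fun x => pvGetW ren x 0)))
        (tot.getD p.1.toNat [])
      tot.set p.1.toNat row) total

-- ===== PORT A =====
-- one iteration of `for i in range(cn//2)` in solve_cycle_rec (branches written out:
-- swap branch first)
def pvStepA (cycle : List Int) (parity : Bool)
    (st : List (List Int) × List (List Int) × List (List Int) × List Int) (i : Nat) :
    List (List Int) × List (List Int) × List (List Int) × List Int :=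
  let a := cycle.getD (2*i) 0
  let b := cycle.getD (2*i+1) 0
  let nc := st.2.2.2 ++ [b]
  if (decide (a > b)) != parity then
    (pvSetAt st.1 a [b, a], pvSetAt st.2.1 b [b, a], pvSetAt st.2.2.1 a [b, a], nc)
  else
    (pvSetAt st.1 b [a, b], pvSetAt st.2.1 a [a, b], pvSetAt st.2.2.1 b [a, b], nc)

-- solve_cycle_rec; fuel (= initial cycle length) only makes the recursion structural,
-- the cycle strictly shrinks each level so it is never exhausted
def pvSolveCycleRec (fuel : Nat) (n : Nat) (cycle : List Int) (parity : Bool) :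
    List (List (List Int)) :=
  match fuel with
  | 0 => []
  | fuel+1 =>
    if cycle.length ≤ 1 then []   -- cn == 1: return []; cn == 0 is unreachable from solve
    else
      let st := (List.range (cycle.length / 2)).foldl (pvStepA cycle parity)
                  (pvDefaultRow n, pvDefaultRow n, pvDefaultRow n, ([] : List Int))
      let nc := if cycle.length % 2 = 1 then st.2.2.2 ++ [cycle.getD (cycle.length - 1) 0]
                else st.2.2.2
      [st.1, st.2.1, st.2.2.1] ++ pvSolveCycleRec fuel n nc (!parity)

-- solve_cycle (its assert always passes on the inputs solve feeds it)
def pvSolveCycleA (c : List Int) : List (List (List Int)) :=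
  pvSolveCycleRec c.length c.length c false

def solve (perm : List Int) : List (List (List Int)) :=
  let n := perm.length
  let st := (List.range n).foldl (fun st i =>
      if pvGetW st.1 (i : Int) true then st
      else
        let bc := pvBuildCycle perm (n+1) st.1 (i : Int)
        let ren := PySem.List.sorted bc.1 (fun x => x) false
        let inv := (PySem.List.enumerate ren 0).foldl (fun inv p => pvSetW inv p.2 p.1) st.2.2
        let subsched := pvSolveCycleA (bc.1.map (fun x => pvGetW inv x (-1)))
        (bc.2, pvMergeStep n ren subsched st.2.1, inv))
    (List.replicate n false, ([] : List (List (List Int))), List.replicate n (-1 : Int))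
  st.2.1

-- ===== PORT B =====
-- cycle[0::2] and cycle[1::2] (hand port of the step-2 slice, exact on lists)
def pvEvens : List Int → List Int
  | [] => []
  | [a] => [a]
  | a :: _ :: r => a :: pvEvens r
def pvOdds : List Int → List Int
  | [] => []
  | _ :: r => pvEvens r

-- one iteration of `for a, b in zip(...)` in solve_cycle_iter (swap branch written out)
def pvStepB (parity : Bool)
    (st : PySem.Dict Int (List Int) × PySem.Dict Int (List Int) × PySem.Dict Int (List Int))
    (p : Int × Int) :
    PySem.Dict Int (List Int) × PySem.Dict Int (List Int) × PySem.Dict Int (List Int) :=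
  if (decide (p.1 > p.2)) != parity then
    (st.1.insert p.1 [p.2, p.1], st.2.1.insert p.2 [p.2, p.1], st.2.2.insert p.1 [p.2, p.1])
  else
    (st.1.insert p.2 [p.1, p.2], st.2.1.insert p.1 [p.1, p.2], st.2.2.insert p.2 [p.1, p.2])

-- [ov.get(i, [i]) for i in range(n)]
def pvMatRow (n : Nat) (d : PySem.Dict Int (List Int)) : List (List Int) :=
  (List.range n).map (fun (i : Nat) => d.getD (i : Int) [(i : Int)])

-- the while loop of solve_cycle_iter; fuel (= initial cycle length) bounds the loop,
-- which strictly shrinks the cycle, so it is never exhausted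
def pvSolveCycleIter (fuel : Nat) (n : Nat) (cycle : List Int) (parity : Bool)
    (total : List (List (List Int))) : List (List (List Int)) :=
  match fuel with
  | 0 => total
  | fuel+1 =>
    if cycle.length ≤ 1 then total
    else
      let st := ((pvEvens cycle).zip (pvOdds cycle)).foldl (pvStepB parity)
                  (PySem.Dict.empty, PySem.Dict.empty, PySem.Dict.empty)
      let blocks := [pvMatRow n st.1, pvMatRow n st.2.1, pvMatRow n st.2.2]
      let nc := pvOdds cycle ++
                (if cycle.length % 2 = 1 then [cycle.getD (cycle.length - 1) 0] else [])
      pvSolveCycleIter fuel n nc (!parity) (total ++ blocks)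

def pvSolveCycleB (c : List Int) : List (List (List Int)) :=
  pvSolveCycleIter c.length c.length c false []

def solve_alt (perm : List Int) : List (List (List Int)) :=
  let n := perm.length
  let st := (List.range n).foldl (fun st i =>
      if pvGetW st.1 (i : Int) true then st
      else
        let bc := pvBuildCycle perm (n+1) st.1 (i : Int)
        let ren := PySem.List.sorted bc.1 (fun x => x) false
        let inv := (PySem.List.enumerate ren 0).foldl (fun inv p => pvSetW inv p.2 p.1) st.2.2
        let subsched := pvSolveCycleB (bc.1.map (fun x => pvGetW inv x (-1)))
        (bc.2, pvMergeStep n ren subsched st.2.1, inv))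
    (List.replicate n false, ([] : List (List (List Int))), List.replicate n (-1 : Int))
  st.2.1

-- ===== PRECONDITION & SPEC =====
-- Pre_solve excludes exactly the inputs on which A raises: an entry ≥ n or < -n is used
-- as an index into the length-n seen array and makes A raise IndexError.
def Pre_solve (perm : List Int) : Prop :=
  ∀ x ∈ perm, -(perm.length : Int) ≤ x ∧ x < (perm.length : Int)
instance (perm : List Int) : Decidable (Pre_solve perm) := by unfold Pre_solve; infer_instance
def pvWitness_solve : List Int := [1, 2, 0]
def Spec_solve (perm : List Int) (out : List (List (List Int))) : Prop := out = solve_alt perm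
instance (perm : List Int) (out : List (List (List Int))) : Decidable (Spec_solve perm out) := by unfold Spec_solve; infer_instance

-- ===== CLAIM (what is proved, stated in full; the proofs are below) =====
def Claim_equal_solve : Prop := ∀ (perm : List Int), Dom_solve perm → Pre_solve perm → Spec_solve perm (solve perm)

-- ===== LEMMAS AND PROOFS =====

-- proof-side: A's per-pair step with the pair given explicitly
def pvStepAB (parity : Bool)
    (st : List (List Int) × List (List Int) × List (List Int) × List Int) (a b : Int) :
    List (List Int) × List (List Int) × List (List Int) × List Int :=
  let nc := st.2.2.2 ++ [b]
  if (decide (a > b)) != parity then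
    (pvSetAt st.1 a [b, a], pvSetAt st.2.1 b [b, a], pvSetAt st.2.2.1 a [b, a], nc)
  else
    (pvSetAt st.1 b [a, b], pvSetAt st.2.1 a [a, b], pvSetAt st.2.2.1 b [a, b], nc)

-- proof-side: fold the cycle two elements at a time (A-shaped state / B-shaped state)
def pvPairsFoldA (parity : Bool) :
    List Int → (List (List Int) × List (List Int) × List (List Int) × List Int) →
    (List (List Int) × List (List Int) × List (List Int) × List Int)
  | a :: b :: r, st => pvPairsFoldA parity r (pvStepAB parity st a b)
  | _, st => st

def pvPairsFoldB (parity : Bool) :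
    List Int →
    (PySem.Dict Int (List Int) × PySem.Dict Int (List Int) × PySem.Dict Int (List Int)) →
    (PySem.Dict Int (List Int) × PySem.Dict Int (List Int) × PySem.Dict Int (List Int))
  | a :: b :: r, st => pvPairsFoldB parity r (pvStepB parity st (a, b))
  | _, st => st

theorem pvStepA_succ (a b : Int) (r : List Int) (parity : Bool) (st : _) (i : Nat) :
    pvStepA (a :: b :: r) parity st (i+1) = pvStepA r parity st i := by
  have h1 : 2*(i+1) = (2*i+1)+1 := by ring
  simp [pvStepA, h1]

theorem pvFoldA_eq (parity : Bool) :
    ∀ (cycle : List Int) (st : _),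
      (List.range (cycle.length / 2)).foldl (pvStepA cycle parity) st =
        pvPairsFoldA parity cycle st
  | [], st => by simp [pvPairsFoldA]
  | [a], st => by simp [pvPairsFoldA]
  | a :: b :: r, st => by
    have hlen : (a :: b :: r).length / 2 = r.length / 2 + 1 := by
      simp [List.length_cons]; omega
    rw [hlen, List.range_succ_eq_map, List.foldl_cons, List.foldl_map]
    have hfun : (fun (st : _) (i : Nat) => pvStepA (a :: b :: r) parity st (i+1)) =
        pvStepA r parity := by
      funext st i; exact pvStepA_succ a b r parity st i
    have hstep0 : pvStepA (a :: b :: r) parity st 0 = pvStepAB parity st a b := by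
      simp [pvStepA, pvStepAB]
    simp only [Nat.succ_eq_add_one, hfun, hstep0]
    rw [pvFoldA_eq parity r (pvStepAB parity st a b)]
    rfl

theorem pvEvens_cons_odds (b : Int) (r : List Int) : pvEvens (b :: r) = b :: pvOdds r := by
  cases r <;> rfl

theorem pvFoldB_eq (parity : Bool) :
    ∀ (cycle : List Int) (st : _),
      ((pvEvens cycle).zip (pvOdds cycle)).foldl (pvStepB parity) st =
        pvPairsFoldB parity cycle st
  | [], st => by simp [pvEvens, pvOdds, pvPairsFoldB]
  | [a], st => by simp [pvEvens, pvOdds, pvPairsFoldB]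
  | a :: b :: r, st => by
    show ((a :: pvEvens r).zip (pvEvens (b :: r))).foldl (pvStepB parity) st = _
    rw [pvEvens_cons_odds]
    simp only [List.zip_cons_cons, List.foldl_cons]
    rw [pvFoldB_eq parity r (pvStepB parity st (a, b))]
    rfl

theorem pvMatRow_length (n : Nat) (d : PySem.Dict Int (List Int)) :
    (pvMatRow n d).length = n := by
  simp only [pvMatRow, List.length_map, List.length_range]

theorem pvMatRow_getElem (n : Nat) (d : PySem.Dict Int (List Int)) (j : Nat) (hjn : j < n) :
    (pvMatRow n d)[j]'((pvMatRow_length n d).symm ▸ hjn) = d.getD (j : Int) [(j : Int)] := by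
  simp only [pvMatRow, List.getElem_map, List.getElem_range]

theorem pvMatRow_insert (n : Nat) (d : PySem.Dict Int (List Int)) (k : Int) (v : List Int) :
    pvMatRow n (d.insert k v) = pvSetAt (pvMatRow n d) k v := by
  by_cases hk : 0 ≤ k
  · apply List.ext_getElem
    · simp only [pvSetAt, if_pos hk, List.length_set, pvMatRow_length]
    · intro j hj hj'
      have hjn : j < n := by rw [pvMatRow_length] at hj; exact hj
      rw [pvMatRow_getElem n _ j hjn]
      simp only [pvSetAt, if_pos hk, List.getElem_set]
      rw [PySem.Dict.getD_insert]
      by_cases hjk : (j : Int) = k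
      · rw [if_pos hjk, if_pos (by omega)]
      · rw [if_neg hjk, if_neg (by omega), pvMatRow_getElem n d j hjn]
  · simp only [pvSetAt, if_neg hk]
    unfold pvMatRow
    apply List.map_congr_left
    intro i _
    rw [PySem.Dict.getD_insert, if_neg (by omega)]

theorem pvMatRow_empty (n : Nat) : pvMatRow n PySem.Dict.empty = pvDefaultRow n := by
  simp [pvMatRow, pvDefaultRow, PySem.Dict.getD_empty]

theorem pvPairsFold_eq (parity : Bool) (n : Nat) :
    ∀ (cycle : List Int) (d0 d1 d2 : PySem.Dict Int (List Int)) (nc : List Int),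
      pvPairsFoldA parity cycle (pvMatRow n d0, pvMatRow n d1, pvMatRow n d2, nc) =
        (pvMatRow n (pvPairsFoldB parity cycle (d0, d1, d2)).1,
         pvMatRow n (pvPairsFoldB parity cycle (d0, d1, d2)).2.1,
         pvMatRow n (pvPairsFoldB parity cycle (d0, d1, d2)).2.2,
         nc ++ pvOdds cycle)
  | [], d0, d1, d2, nc => by simp [pvPairsFoldA, pvPairsFoldB, pvOdds]
  | [a], d0, d1, d2, nc => by simp [pvPairsFoldA, pvPairsFoldB, pvOdds, pvEvens]
  | a :: b :: r, d0, d1, d2, nc => by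
    show pvPairsFoldA parity r
        (pvStepAB parity (pvMatRow n d0, pvMatRow n d1, pvMatRow n d2, nc) a b) = _
    have hodds : pvOdds (a :: b :: r) = b :: pvOdds r := pvEvens_cons_odds b r
    by_cases hc : ((decide (a > b)) != parity) = true
    · have hstep : pvStepAB parity (pvMatRow n d0, pvMatRow n d1, pvMatRow n d2, nc) a b =
          (pvMatRow n (d0.insert a [b, a]), pvMatRow n (d1.insert b [b, a]),
           pvMatRow n (d2.insert a [b, a]), nc ++ [b]) := by
        simp [pvStepAB, hc, pvMatRow_insert]
      rw [hstep, pvPairsFold_eq parity n r _ _ _ (nc ++ [b])]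
      have hB : pvPairsFoldB parity (a :: b :: r) (d0, d1, d2) =
          pvPairsFoldB parity r (d0.insert a [b, a], d1.insert b [b, a], d2.insert a [b, a]) := by
        show pvPairsFoldB parity r (pvStepB parity (d0, d1, d2) (a, b)) = _
        simp [pvStepB, hc]
      rw [hB, hodds, List.append_assoc]
      rfl
    · have hstep : pvStepAB parity (pvMatRow n d0, pvMatRow n d1, pvMatRow n d2, nc) a b =
          (pvMatRow n (d0.insert b [a, b]), pvMatRow n (d1.insert a [a, b]),
           pvMatRow n (d2.insert b [a, b]), nc ++ [b]) := by
        simp only [pvStepAB, Bool.not_eq_true] at hc ⊢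
        simp [hc, pvMatRow_insert]
      rw [hstep, pvPairsFold_eq parity n r _ _ _ (nc ++ [b])]
      have hB : pvPairsFoldB parity (a :: b :: r) (d0, d1, d2) =
          pvPairsFoldB parity r (d0.insert b [a, b], d1.insert a [a, b], d2.insert b [a, b]) := by
        show pvPairsFoldB parity r (pvStepB parity (d0, d1, d2) (a, b)) = _
        simp only [pvStepB, Bool.not_eq_true] at hc ⊢
        simp [hc]
      rw [hB, hodds, List.append_assoc]
      rfl

theorem pvIter_eq_rec (fuel : Nat) :
    ∀ (n : Nat) (cycle : List Int) (parity : Bool) (total : List (List (List Int))),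
      pvSolveCycleIter fuel n cycle parity total =
        total ++ pvSolveCycleRec fuel n cycle parity := by
  induction fuel with
  | zero => intro n cycle parity total; simp [pvSolveCycleIter, pvSolveCycleRec]
  | succ fuel ih =>
    intro n cycle parity total
    show (if cycle.length ≤ 1 then total else _) = total ++ (if cycle.length ≤ 1 then [] else _)
    by_cases h : cycle.length ≤ 1
    · simp [h]
    · rw [if_neg h, if_neg h]
      rw [pvFoldB_eq, ih]
      have hA : (List.range (cycle.length / 2)).foldl (pvStepA cycle parity)
            (pvDefaultRow n, pvDefaultRow n, pvDefaultRow n, ([] : List Int)) =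
          (pvMatRow n (pvPairsFoldB parity cycle
              (PySem.Dict.empty, PySem.Dict.empty, PySem.Dict.empty)).1,
           pvMatRow n (pvPairsFoldB parity cycle
              (PySem.Dict.empty, PySem.Dict.empty, PySem.Dict.empty)).2.1,
           pvMatRow n (pvPairsFoldB parity cycle
              (PySem.Dict.empty, PySem.Dict.empty, PySem.Dict.empty)).2.2,
           pvOdds cycle) := by
        rw [pvFoldA_eq, ← pvMatRow_empty n, pvPairsFold_eq]
        rfl
      have hnc : (if cycle.length % 2 = 1 then
            pvOdds cycle ++ [cycle.getD (cycle.length - 1) 0] else pvOdds cycle) =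
          pvOdds cycle ++
            (if cycle.length % 2 = 1 then [cycle.getD (cycle.length - 1) 0] else []) := by
        by_cases hp : cycle.length % 2 = 1 <;> simp [hp]
      simp only [hA, hnc, List.append_assoc]

theorem pvSolveCycle_eq : pvSolveCycleA = pvSolveCycleB := by
  funext c
  show pvSolveCycleRec c.length c.length c false = _
  rw [← List.nil_append (pvSolveCycleRec c.length c.length c false), ← pvIter_eq_rec]
  rfl

-- ===== VERDICT (by name: the statement is the Claim_ definition above) =====
theorem solve_spec : Claim_equal_solve := by
  intro perm _ _
  show solve perm = solve_alt perm
  simp only [solve, solve_alt, pvSolveCycle_eq]
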